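-- pv_equiv track=rewrite | github.com/harshaldulera/ThunderCipher-Writeups | Scripting/scripts/FollowTheRules.py | apply_rule_6
-- ===== SOURCE A (Python) =====
-- def is_vowel(char):
--     return char.lower() in 'aeiou'
--
-- def is_special_char(char):
--     return char in '@#_&-+]|$!'
--
-- def next_alphabetical_char(char):
--     if char.isalpha():
--         if char == 'z':
--             return 'a'
--         elif char == 'Z':
--             return 'A'
--         else:
--             return chr(ord(char) + 1)
--     return char
--
-- def apply_rule_6(word):
--     size = len(word)
--     result = []
--
--     for n in range(size):
--         current_char = word[n]
--         if current_char.lower() not in 'aeiou':  # Check if consonant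
--             s = 0
--             for i in range(n, size):
--                 z = ord(next_alphabetical_char(word[i]))
--                 V = 1 if is_vowel(word[(n + 1) % size]) else 0
--                 G = n if n > 0 and is_special_char(word[n - 1]) else 23
--                 s += i * z ** V + (G % 7)
--
--             c = ord(current_char)
--             new_char = chr((c + s) % 95 + 32)
--             result.append(new_char)
--         else:
--             result.append(current_char)
--
--     return ''.join(result)
-- ===== SOURCE B (Python) =====
-- def is_vowel(char):
--     return char.lower() in 'aeiou'
--
-- def is_special_char(char):
--     return char in '@#_&-+]|$!'
--
-- def next_alphabetical_char(char):
--     if char.isalpha():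
--         if char == 'z':
--             return 'a'
--         elif char == 'Z':
--             return 'A'
--         else:
--             return chr(ord(char) + 1)
--     return char
--
-- def apply_rule_6(word):
--     size = len(word)
--     z = [ord(next_alphabetical_char(c)) for c in word]
--     # suffix sums: s1[n] = sum(i for i in range(n, size)), sz[n] = sum(i*z[i] ...)
--     s1 = [0] * (size + 1)
--     sz = [0] * (size + 1)
--     for n in range(size - 1, -1, -1):
--         s1[n] = s1[n + 1] + n
--         sz[n] = sz[n + 1] + n * z[n]
--     out = []
--     for n in range(size):
--         ch = word[n]
--         if ch.lower() in 'aeiou':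
--             out.append(ch)
--         else:
--             V = is_vowel(word[(n + 1) % size])
--             g = (n if n > 0 and is_special_char(word[n - 1]) else 23) % 7
--             s = (sz[n] if V else s1[n]) + (size - n) * g
--             out.append(chr((ord(ch) + s) % 95 + 32))
--     return ''.join(out)
-- ===== Notes on version B (the rewrite author's own statement) =====
-- stated objective: faster
-- what changed: Replaced A's per-position rescan of the whole suffix by two precomputed suffix-sum tables (sum of i and of i*z_i over i>=n), O(1) per position: O(n) vs A's O(n^2), measured hundreds of times faster at n=4096 (on all-vowel inputs, where A skips every inner scan, B's table build can lose a constant factor).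
import Mathlib
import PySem

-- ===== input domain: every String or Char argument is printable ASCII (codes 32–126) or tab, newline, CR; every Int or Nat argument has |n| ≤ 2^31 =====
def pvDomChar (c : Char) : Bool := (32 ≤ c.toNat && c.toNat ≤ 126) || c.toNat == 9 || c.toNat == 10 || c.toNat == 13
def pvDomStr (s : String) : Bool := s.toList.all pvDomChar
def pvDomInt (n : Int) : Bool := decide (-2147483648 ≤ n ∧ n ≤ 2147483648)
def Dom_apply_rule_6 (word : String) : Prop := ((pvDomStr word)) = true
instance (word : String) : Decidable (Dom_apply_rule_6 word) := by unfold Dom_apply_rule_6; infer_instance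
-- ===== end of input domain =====

-- B replaces A's quadratic inner scan by two suffix-sum tables (sum of i and of i*z_i), O(1) per position: faster, O(n) vs A's O(n^2) (measured; on all-vowel inputs A skips every inner scan and B's table build can lose a constant factor).

-- ===== PORT A =====
-- helpers shared by both Pythons (same module), exact on the ASCII domain
def pvIsVowel (c : Char) : Bool := "aeiou".toList.contains c.toLower

def pvIsSpecial (c : Char) : Bool := "@#_&-+]|$!".toList.contains c

def pvNextAlpha (c : Char) : Char :=
  if c.isAlpha then
    if c = 'z' then 'a'
    else if c = 'Z' then 'A'
    else Char.ofNat (c.toNat + 1)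
  else c

-- literal port of A; range(n, size) over naturals is List.range' n (size - n) (exact: 0 ≤ n ≤ size);
-- all indices are in range so l.getD is exact; all quantities are nonnegative so Nat arithmetic is exact.
def apply_rule_6 (word : String) : String :=
  let l := word.toList
  let size := l.length
  let result := (List.range size).foldl (fun acc n =>
    let current_char := l.getD n ' '
    if ¬ pvIsVowel current_char then
      let s := (List.range' n (size - n)).foldl (fun s i =>
        let z := (pvNextAlpha (l.getD i ' ')).toNat
        let V := if pvIsVowel (l.getD ((n + 1) % size) ' ') then 1 else 0
        let G := if 0 < n ∧ pvIsSpecial (l.getD (n - 1) ' ') then n else 23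
        s + i * z ^ V + G % 7) 0
      acc ++ [Char.ofNat ((current_char.toNat + s) % 95 + 32)]
    else acc ++ [current_char]) ([] : List Char)
  String.mk result

-- ===== PORT B =====
-- suffix sums, built back to front exactly as Source B's reverse loop: s1[n] = s1[n+1] + n
def pvS1 (n size : Nat) : Nat :=
  if n < size then n + pvS1 (n + 1) size else 0
termination_by size - n

-- sz[n] = sz[n+1] + n * z[n], z i = ord(next_alphabetical_char(word[i]))
def pvSZ (l : List Char) (n size : Nat) : Nat :=
  if n < size then n * (pvNextAlpha (l.getD n ' ')).toNat + pvSZ l (n + 1) size else 0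
termination_by size - n

def apply_rule_6_alt (word : String) : String :=
  let l := word.toList
  let size := l.length
  String.mk <| (List.range size).map fun n =>
    let ch := l.getD n ' '
    if pvIsVowel ch then ch
    else
      let V := pvIsVowel (l.getD ((n + 1) % size) ' ')
      let g := (if 0 < n ∧ pvIsSpecial (l.getD (n - 1) ' ') then n else 23) % 7
      let s := (if V then pvSZ l n size else pvS1 n size) + (size - n) * g
      Char.ofNat ((ch.toNat + s) % 95 + 32)

-- ===== PRECONDITION & SPEC =====
def Spec_apply_rule_6 (word : String) (out : String) : Prop := out = apply_rule_6_alt word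
instance (word : String) (out : String) : Decidable (Spec_apply_rule_6 word out) := by unfold Spec_apply_rule_6; infer_instance

-- ===== CLAIM (what is proved, stated in full; the proofs are below) =====
def Claim_equal_apply_rule_6 : Prop := ∀ (word : String), Dom_apply_rule_6 word → Spec_apply_rule_6 word (apply_rule_6 word)

-- ===== LEMMAS AND PROOFS =====

-- pulling the accumulator out of a sum-fold
theorem pv_foldl_shift (f : Nat → Nat) :
    ∀ (xs : List Nat) (acc : Nat),
      xs.foldl (fun s i => s + f i) acc = acc + xs.foldl (fun s i => s + f i) 0 := by
  intro xs
  induction xs with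
  | nil => intro acc; simp
  | cons x xs ih => intro acc; simp only [List.foldl_cons]; rw [ih, ih (acc := 0 + f x)]; ring

theorem pv_foldl_shiftg (f : Nat → Nat) (g : Nat) :
    ∀ (xs : List Nat) (acc : Nat),
      xs.foldl (fun s i => s + f i + g) acc = acc + xs.foldl (fun s i => s + f i + g) 0 := by
  intro xs
  induction xs with
  | nil => intro acc; simp
  | cons x xs ih => intro acc; simp only [List.foldl_cons]; rw [ih, ih (acc := 0 + f x + g)]; ring

-- A's inner loop with body s + f i + g over range(n, n+k) equals the pure f-sum plus k*g.
theorem pv_foldl_split (f : Nat → Nat) (g : Nat) :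
    ∀ (k n : Nat), (List.range' n k).foldl (fun s i => s + f i + g) 0
      = (List.range' n k).foldl (fun s i => s + f i) 0 + k * g := by
  intro k
  induction k with
  | zero => intro n; simp
  | succ k ih =>
    intro n
    rw [List.range'_succ]
    simp only [List.foldl_cons]
    rw [pv_foldl_shiftg, pv_foldl_shift, ih]
    ring

theorem pvS1_spec : ∀ (k n : Nat),
    (List.range' n k).foldl (fun s i => s + i) 0 = pvS1 n (n + k) := by
  intro k
  induction k with
  | zero => intro n; rw [pvS1]; simp
  | succ k ih =>
    intro n
    rw [List.range'_succ, pvS1]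
    simp only [List.foldl_cons, if_pos (by omega : n < n + (k + 1))]
    rw [pv_foldl_shift (fun i => i), ih (n + 1)]
    have h : n + 1 + k = n + (k + 1) := by omega
    rw [h]
    ring

theorem pvSZ_spec (l : List Char) : ∀ (k n : Nat),
    (List.range' n k).foldl (fun s i => s + i * (pvNextAlpha (l.getD i ' ')).toNat) 0
      = pvSZ l n (n + k) := by
  intro k
  induction k with
  | zero => intro n; rw [pvSZ]; simp
  | succ k ih =>
    intro n
    rw [List.range'_succ, pvSZ]
    simp only [List.foldl_cons, if_pos (by omega : n < n + (k + 1))]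
    rw [pv_foldl_shift (fun i => i * (pvNextAlpha (l.getD i ' ')).toNat), ih (n + 1)]
    have h : n + 1 + k = n + (k + 1) := by omega
    rw [h]
    ring

-- A's per-position sum equals B's table lookup
theorem pv_inner_eq (l : List Char) (n : Nat) (hn : n ≤ l.length) :
    (List.range' n (l.length - n)).foldl (fun s i =>
        s + i * (pvNextAlpha (l.getD i ' ')).toNat ^
              (if pvIsVowel (l.getD ((n + 1) % l.length) ' ') then 1 else 0)
          + (if 0 < n ∧ pvIsSpecial (l.getD (n - 1) ' ') then n else 23) % 7) 0
      = (if pvIsVowel (l.getD ((n + 1) % l.length) ' ') then pvSZ l n l.length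
          else pvS1 n l.length)
        + (l.length - n) *
            ((if 0 < n ∧ pvIsSpecial (l.getD (n - 1) ' ') then n else 23) % 7) := by
  set g := (if 0 < n ∧ pvIsSpecial (l.getD (n - 1) ' ') then n else 23) % 7 with hg
  have hsize : n + (l.length - n) = l.length := by omega
  by_cases hV : pvIsVowel (l.getD ((n + 1) % l.length) ' ')
  · simp only [hV, if_pos, pow_one]
    rw [pv_foldl_split (fun i => i * (pvNextAlpha (l.getD i ' ')).toNat) g, pvSZ_spec, hsize]
  · simp only [hV, Bool.false_eq_true, if_false, pow_zero, Nat.mul_one]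
    rw [pv_foldl_split (fun i => i) g, pvS1_spec, hsize]

theorem pv_foldl_append_ite {α β : Type} (c : α → Prop) [DecidablePred c] (u v : α → β) :
    ∀ (xs : List α) (acc : List β),
      xs.foldl (fun acc n => if c n then acc ++ [u n] else acc ++ [v n]) acc
        = acc ++ xs.map (fun n => if c n then u n else v n) := by
  intro xs
  induction xs with
  | nil => intro acc; simp
  | cons x xs ih =>
    intro acc
    by_cases h : c x <;> simp [h, ih]

-- ===== VERDICT (by name: the statement is the Claim_ definition above) =====
theorem apply_rule_6_spec : Claim_equal_apply_rule_6 := by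
  intro word _
  unfold Spec_apply_rule_6 apply_rule_6 apply_rule_6_alt
  simp only []
  rw [pv_foldl_append_ite, List.nil_append]
  congr 1
  apply List.map_congr_left
  intro n hn
  have hn' : n < word.toList.length := List.mem_range.mp hn
  by_cases hv : pvIsVowel (word.toList.getD n ' ')
  · simp only [List.getD_eq_getElem?_getD] at hv
    simp [hv]
  · simp only [hv, not_false_iff, if_pos, Bool.false_eq_true, if_false]
    rw [pv_inner_eq word.toList n (le_of_lt hn')]
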